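-- pv_equiv track=rewrite | github.com/gulshan-100/Coding-Problems | Arrays/largest_next_number.py | largest_next_number
-- ===== SOURCE A (Python) =====
-- def largest_next_number(array):
--     result = []
--     for i in range(0, len(array)):
--         for j in range(i+1, len(array)):
--             if array[j] > array[i]:
--                 result.append(array[j])
--                 break
--     return result
-- ===== SOURCE B (Python) =====
-- def largest_next_number(array):
--     stack = []   # values of the suffix already seen, strictly increasing from top
--     out = []
--     for v in reversed(array):
--         while stack and stack[-1] <= v:
--             stack.pop()
--         if stack:
--             out.append(stack[-1])
--         stack.append(v)
--     out.reverse()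
--     return out
-- ===== Notes on version B (the rewrite author's own statement) =====
-- stated objective: faster
-- what changed: Replaced the per-index forward rescan with a single right-to-left pass over the array maintaining a monotonic stack, so each element is pushed and popped at most once.
import Mathlib
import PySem

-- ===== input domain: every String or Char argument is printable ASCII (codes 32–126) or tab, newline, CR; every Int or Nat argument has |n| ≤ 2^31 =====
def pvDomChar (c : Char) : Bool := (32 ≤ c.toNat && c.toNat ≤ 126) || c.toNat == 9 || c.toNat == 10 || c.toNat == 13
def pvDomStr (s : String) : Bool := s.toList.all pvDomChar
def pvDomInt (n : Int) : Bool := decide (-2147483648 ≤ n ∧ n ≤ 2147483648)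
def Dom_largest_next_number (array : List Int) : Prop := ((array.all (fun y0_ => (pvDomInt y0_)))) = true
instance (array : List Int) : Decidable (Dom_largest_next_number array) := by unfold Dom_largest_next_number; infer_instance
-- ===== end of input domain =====

-- B replaces A's quadratic per-index forward rescan by one right-to-left monotonic-stack pass (O(n)); same return value.

-- ===== PORT A =====
-- inner 'for j in range(i+1, len(array)): if array[j] > array[i]: result.append(array[j]); break'
def pvInnerA (array : List Int) (ai : Int) (js : List Int) (result : List Int) : List Int :=
  match js with
  | [] => result
  | j :: rest =>
      let aj := PySem.List.pyGetD array j 0   -- j always in range here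
      if ai < aj then result ++ [aj] else pvInnerA array ai rest result

def largest_next_number (array : List Int) : List Int :=
  (PySem.List.pyRange 0 (array.length : Int) 1).foldl
    (fun result i =>
      pvInnerA array (PySem.List.pyGetD array i 0)
        (PySem.List.pyRange (i + 1) (array.length : Int) 1) result)
    []

-- ===== PORT B =====
-- 'while stack and stack[-1] <= v: stack.pop()'  (stack top = list head)
def pvPopLE (v : Int) : List Int → List Int
  | [] => []
  | t :: rest => if t ≤ v then pvPopLE v rest else t :: rest

def largest_next_number_alt (array : List Int) : List Int :=
  let st := array.reverse.foldl
    (fun (s : List Int × List Int) v =>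
      let stack' := pvPopLE v s.1
      (v :: stack',
       match stack' with
       | [] => s.2
       | t :: _ => s.2 ++ [t]))
    ([], [])
  st.2.reverse

-- ===== PRECONDITION & SPEC =====
def Spec_largest_next_number (array : List Int) (out : List Int) : Prop := out = largest_next_number_alt array
instance (array : List Int) (out : List Int) : Decidable (Spec_largest_next_number array out) := by unfold Spec_largest_next_number; infer_instance

-- ===== CLAIM (what is proved, stated in full; the proofs are below) =====
def Claim_equal_largest_next_number : Prop := ∀ (array : List Int), Dom_largest_next_number array → Spec_largest_next_number array (largest_next_number array)

-- ===== LEMMAS AND PROOFS =====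

-- common specification: for each element, the first strictly greater element to its right (skipped if none)
def pvSpec : List Int → List Int
  | [] => []
  | v :: rest => (rest.find? (fun y => v < y)).toList ++ pvSpec rest

-- ---- A side ----

theorem pvInnerA_eq (array : List Int) (ai : Int) (js res : List Int) :
    pvInnerA array ai js res
      = res ++ ((js.map (fun j => PySem.List.pyGetD array j 0)).find? (fun y => ai < y)).toList := by
  induction js generalizing res with
  | nil => simp [pvInnerA]
  | cons j rest ih =>
      simp only [pvInnerA, List.map_cons, List.find?_cons]
      by_cases h : ai < PySem.List.pyGetD array j 0
      · simp [h]
      · simp [h, ih]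

theorem pvA_loop (pre suf res : List Int) :
    ((PySem.List.pyRange (pre.length : Int) (((pre ++ suf).length : Nat) : Int) 1).foldl
      (fun result i =>
        pvInnerA (pre ++ suf) (PySem.List.pyGetD (pre ++ suf) i 0)
          (PySem.List.pyRange (i + 1) (((pre ++ suf).length : Nat) : Int) 1) result)
      res)
      = res ++ pvSpec suf := by
  induction suf generalizing pre res with
  | nil =>
      rw [PySem.List.pyRange_one_eq_nil (by simp)]
      simp [pvSpec]
  | cons v rest ih =>
      have hlen : ((pre.length : Int)) < (((pre ++ v :: rest).length : Nat) : Int) := by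
        simp
      rw [PySem.List.pyRange_one_cons hlen]
      simp only [List.foldl_cons]
      have hv : PySem.List.pyGetD (pre ++ v :: rest) (pre.length : Int) 0 = v := by
        rw [PySem.List.pyGetD_natCast]
        simp [List.getD]
      have hinner :
          pvInnerA (pre ++ v :: rest) v
            (PySem.List.pyRange ((pre.length : Int) + 1) (((pre ++ v :: rest).length : Nat) : Int) 1) res
            = res ++ ((rest.find? (fun y => v < y)).toList) := by
        rw [pvInnerA_eq]
        congr 2
        have hmap := PySem.List.map_pyGetD_pyRange (xs := pre ++ v :: rest)
          (a := (pre.length : Int) + 1) (d := 0) (by positivity)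
        simp only [PySem.List.len_eq] at hmap
        rw [hmap]
        have h1 : ((pre.length : Int) + 1).toNat = (pre ++ [v]).length := by simp
        have h0 : pre ++ v :: rest = (pre ++ [v]) ++ rest := by simp
        rw [h1, h0, List.drop_left]
      rw [hv, hinner]
      have h2 := ih (pre ++ [v]) (res ++ (rest.find? (fun y => v < y)).toList)
      simp only [List.append_assoc, List.singleton_append, List.length_append,
        List.length_cons, List.length_nil, Nat.cast_add, Nat.cast_one,
        zero_add] at h2 ⊢
      rw [h2]
      simp [pvSpec]

theorem pvA_eq_spec (array : List Int) : largest_next_number array = pvSpec array := by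
  have h := pvA_loop [] array []
  simpa [largest_next_number] using h

-- ---- B side ----

theorem pvPopLE_head? (v : Int) (l : List Int) :
    (pvPopLE v l).head? = l.find? (fun y => v < y) := by
  induction l with
  | nil => simp [pvPopLE]
  | cons t rest ih =>
      by_cases h : t ≤ v
      · have : ¬ v < t := not_lt.mpr h
        simp [pvPopLE, h, this, ih]
      · have : v < t := not_le.mp h
        simp [pvPopLE, h, this]

theorem pvFind?_popLE (x w : Int) (l : List Int) (h : w ≤ x) :
    (pvPopLE w l).find? (fun y => x < y) = l.find? (fun y => x < y) := by
  induction l with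
  | nil => simp [pvPopLE]
  | cons t rest ih =>
      by_cases ht : t ≤ w
      · have : ¬ x < t := not_lt.mpr (ht.trans h)
        simp [pvPopLE, ht, this, ih]
      · simp [pvPopLE, ht]

def pvStackOf : List Int → List Int
  | [] => []
  | v :: l => v :: pvPopLE v (pvStackOf l)

theorem pvFind?_stackOf (x : Int) (l : List Int) :
    (pvStackOf l).find? (fun y => x < y) = l.find? (fun y => x < y) := by
  induction l with
  | nil => simp [pvStackOf]
  | cons v rest ih =>
      by_cases h : x < v
      · simp [pvStackOf, h]
      · have hle : v ≤ x := not_lt.mp h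
        simp [pvStackOf, h, pvFind?_popLE x v _ hle, ih]

def pvOutOf : List Int → List Int
  | [] => []
  | v :: l => pvOutOf l ++ (pvPopLE v (pvStackOf l)).head?.toList

theorem pvFold_eq (array : List Int) :
    (array.reverse.foldl
      (fun (s : List Int × List Int) v =>
        let stack' := pvPopLE v s.1
        (v :: stack',
         match stack' with
         | [] => s.2
         | t :: _ => s.2 ++ [t]))
      ([], []))
      = (pvStackOf array, pvOutOf array) := by
  rw [List.foldl_reverse]
  induction array with
  | nil => simp [pvStackOf, pvOutOf]
  | cons v rest ih =>
      simp only [List.foldr_cons, ih]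
      refine Prod.ext ?_ ?_
      · simp [pvStackOf]
      · cases h : pvPopLE v (pvStackOf rest) with
        | nil => simp [pvOutOf, h]
        | cons t ts => simp [pvOutOf, h]

theorem pvOutOf_eq (l : List Int) : pvOutOf l = (pvSpec l).reverse := by
  induction l with
  | nil => simp [pvOutOf, pvSpec]
  | cons v rest ih =>
      have h : (pvPopLE v (pvStackOf rest)).head? = rest.find? (fun y => v < y) := by
        rw [pvPopLE_head?, pvFind?_stackOf]
      simp only [pvOutOf, pvSpec, ih, h, List.reverse_append]
      cases rest.find? (fun y => v < y) <;> simp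

theorem pvB_eq_spec (array : List Int) : largest_next_number_alt array = pvSpec array := by
  simp only [largest_next_number_alt, pvFold_eq, pvOutOf_eq, List.reverse_reverse]

-- ===== VERDICT (by name: the statement is the Claim_ definition above) =====
theorem largest_next_number_spec : Claim_equal_largest_next_number := by
  intro array _
  unfold Spec_largest_next_number
  rw [pvA_eq_spec, pvB_eq_spec]
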